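-- pv_equiv track=rewrite | github.com/chenxu05037/COSPLAY | agents/utils/utils.py | split_pad_vector
-- ===== SOURCE A (Python) =====
-- def padding(_xs, max_1d_size, max_2d_size, null_idx):
--     for _ in range(max_1d_size - len(_xs)):
--         _xs.append([])
--     for x in _xs:
--         for _ in range(max_2d_size - len(x)):
--             x.append(null_idx)
--
-- def split_pad_vector(xs, separator, null_idx):
--     """
--     Use the splitor to split the sentences.
--
--     spliter is the value that represents END TOKEN
--     :param x: input
--     :param separator: the required seperator
--     :return: a list of dialogs after splitting and padding
--     """
--
--     def split(x):
--         _xs = []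
--         temp_x = []
--         for _x in x:
--             if _x == separator:
--                 _xs.append(temp_x)
--                 temp_x = []
--                 continue
--             if _x != null_idx:
--                 temp_x.append(_x)
--         if len(temp_x):
--             _xs.append(temp_x)
--         return _xs
--
--     def get_max_words_size(_xs):
--         max_size = 0
--         for agent in _xs:
--             for dialog in agent:
--                 if len(dialog) > max_size:
--                     max_size = len(dialog)
--         return max_size
--
--     xs = [split(x) for x in xs]
--     max_turn_size = max((len(x) for x in xs))
--     max_words_size = get_max_words_size(xs)
--     for agent in xs:
--         padding(agent, max_turn_size, max_words_size, null_idx)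
--     return xs
-- ===== SOURCE B (Python) =====
-- def split_pad_vector(xs, separator, null_idx):
--     # Different decomposition: split by searching separator positions with
--     # list.index and slicing recursively (instead of A's token-by-token
--     # accumulator loop), then pad by overlaying each dialog onto a
--     # pre-built grid of null rows (instead of A's append-based padding).
--     def split(x):
--         if separator in x:
--             k = x.index(separator)
--             return [[t for t in x[:k] if t != null_idx]] + split(x[k + 1:])
--         tail = [t for t in x if t != null_idx]
--         return [tail] if tail else []
--
--     splits = [split(x) for x in xs]
--     max_turn = max(len(a) for a in splits)
--     max_words = max((len(d) for a in splits for d in a), default=0)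
--     out = []
--     for agent in splits:
--         grid = [[null_idx] * max_words for _ in range(max_turn)]
--         for row, d in zip(grid, agent):
--             row[:len(d)] = d
--         out.append(grid)
--     return out
-- ===== Notes on version B (the rewrite author's own statement) =====
-- stated objective: alternative
-- what changed: Splitting is done by recursively searching the next separator position with list.index and slicing (instead of A's token-by-token accumulator loop), and padding is done by overlaying each dialog onto a pre-built grid of null rows via slice assignment (instead of A's mutating append-based padding helper and three separate max scans).
import Mathlib
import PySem

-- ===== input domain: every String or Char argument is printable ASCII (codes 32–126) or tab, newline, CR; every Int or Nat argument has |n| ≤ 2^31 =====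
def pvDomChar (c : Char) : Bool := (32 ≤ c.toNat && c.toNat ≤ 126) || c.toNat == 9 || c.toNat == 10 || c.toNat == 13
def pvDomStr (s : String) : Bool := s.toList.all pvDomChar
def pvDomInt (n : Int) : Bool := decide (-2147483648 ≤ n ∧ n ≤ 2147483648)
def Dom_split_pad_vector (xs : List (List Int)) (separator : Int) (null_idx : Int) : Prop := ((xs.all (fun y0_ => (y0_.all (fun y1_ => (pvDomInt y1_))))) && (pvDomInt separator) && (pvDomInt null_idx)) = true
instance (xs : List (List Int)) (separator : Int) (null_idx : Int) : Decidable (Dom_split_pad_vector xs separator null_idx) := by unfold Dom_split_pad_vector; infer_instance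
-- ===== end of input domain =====

-- B splits by recursively locating separator positions with list.index and slicing, and pads by
-- overlaying dialogs onto a grid of null rows (alternative decomposition); return values only, A does not mutate its input.

-- ===== PORT A =====
-- A's inner `split(x)` loop (foldl over x with state (finished dialogs, current dialog)), then the trailing `if len(temp_x)` check.
def pvSplitA (separator null_idx : Int) (x : List Int) : List (List Int) :=
  let st := x.foldl (fun (acc : List (List Int) × List Int) t =>
    if t = separator then (acc.1 ++ [acc.2], [])
    else if t ≠ null_idx then (acc.1, acc.2 ++ [t])
    else acc) ([], [])
  if st.2.length ≠ 0 then st.1 ++ [st.2] else st.1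

-- A's get_max_words_size: nested loops with `if len(dialog) > max_size`.
def pvMaxWordsA (xss : List (List (List Int))) : Nat :=
  xss.foldl (fun m agent =>
    agent.foldl (fun m d => if d.length > m then d.length else m) m) 0

-- A's padding helper: append [] until max_1d_size, then append null_idx to every row until max_2d_size.
def pvPaddingA (agent : List (List Int)) (max1 max2 : Nat) (null_idx : Int) : List (List Int) :=
  let ext := (PySem.List.pyRange 0 ((max1 : Int) - (agent.length : Int)) 1).foldl
      (fun a _ => a ++ [([] : List Int)]) agent
  ext.map (fun x => (PySem.List.pyRange 0 ((max2 : Int) - (x.length : Int)) 1).foldl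
      (fun a _ => a ++ [null_idx]) x)

def split_pad_vector (xs : List (List Int)) (separator : Int) (null_idx : Int) : List (List (List Int)) :=
  let xs' := xs.map (pvSplitA separator null_idx)
  match (xs'.map (·.length)).max? with
  | none => []   -- Python raises ValueError here (empty xs); excluded by Pre_
  | some maxTurn =>
    let maxWords := pvMaxWordsA xs'
    xs'.map (fun agent => pvPaddingA agent maxTurn maxWords null_idx)

-- ===== PORT B =====
-- B's recursive split: `separator in x` / `x.index(separator)` is the match on PySem.List.index?
-- (some k = first occurrence, none = not present); x[:k] and x[k+1:] are take/drop (indices are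
-- in range, where Python slices are exactly take/drop).
def pvSplitB (sep nul : Int) (x : List Int) : List (List Int) :=
  match h : PySem.List.index? x sep with
  | some k => ((x.take k).filter (fun t => t ≠ nul)) :: pvSplitB sep nul (x.drop (k + 1))
  | none =>
    let tail := x.filter (fun t => t ≠ nul)
    if tail.isEmpty then [] else [tail]
termination_by x.length
decreasing_by
  obtain ⟨hk, -⟩ := PySem.List.getElem_of_index?_eq_some h
  simp [List.length_drop]; omega

-- Python's `row[:len(d)] = d` on `zip(grid, agent)`: each zipped row becomes d ++ rest of the row.
def pvOverlay : List (List Int) → List (List Int) → List (List Int)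
  | g, [] => g
  | [], _ => []
  | r :: g, d :: a => (d ++ r.drop d.length) :: pvOverlay g a

def split_pad_vector_alt (xs : List (List Int)) (separator : Int) (null_idx : Int) : List (List (List Int)) :=
  let splits := xs.map (pvSplitB separator null_idx)
  -- max(len(a) for a in splits): none = ValueError on empty xs (excluded by Pre_)
  match PySem.List.max? (splits.map (·.length)) (fun n => n) with
  | none => []
  | some maxTurn =>
    -- max((len(d) for a in splits for d in a), default=0)
    let maxWords := (PySem.List.max? (splits.flatMap (fun a => a.map (·.length))) (fun n => n)).getD 0
    splits.map (fun agent =>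
      pvOverlay ((List.range maxTurn).map (fun _ => List.replicate maxWords null_idx)) agent)

-- ===== PRECONDITION & SPEC =====
-- Pre_ excludes only the empty list of sequences, on which both Pythons' max() over an empty generator raises ValueError.
def Pre_split_pad_vector (xs : List (List Int)) (separator : Int) (null_idx : Int) : Prop := xs ≠ []
instance (xs : List (List Int)) (separator : Int) (null_idx : Int) : Decidable (Pre_split_pad_vector xs separator null_idx) := by unfold Pre_split_pad_vector; infer_instance
def pvWitness_split_pad_vector : List (List Int) × Int × Int := ([[1, 2, 0, 3], [4, 0]], 0, 9)

def Spec_split_pad_vector (xs : List (List Int)) (separator : Int) (null_idx : Int) (out : List (List (List Int))) : Prop := out = split_pad_vector_alt xs separator null_idx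
instance (xs : List (List Int)) (separator : Int) (null_idx : Int) (out : List (List (List Int))) : Decidable (Spec_split_pad_vector xs separator null_idx out) := by unfold Spec_split_pad_vector; infer_instance

-- ===== CLAIM (what is proved, stated in full; the proofs are below) =====
def Claim_equal_split_pad_vector : Prop := ∀ (xs : List (List Int)) (separator : Int) (null_idx : Int), Dom_split_pad_vector xs separator null_idx → Pre_split_pad_vector xs separator null_idx → Spec_split_pad_vector xs separator null_idx (split_pad_vector xs separator null_idx)

-- ===== LEMMAS AND PROOFS =====

-- Proof-side reference form of the split: structural recursion with the current-dialog accumulator.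
def splitSpec (sep nul : Int) : List Int → List Int → List (List Int)
  | [], cur => if cur.isEmpty then [] else [cur]
  | t :: rest, cur =>
    if t = sep then cur :: splitSpec sep nul rest []
    else if t = nul then splitSpec sep nul rest cur
    else splitSpec sep nul rest (cur ++ [t])

-- A's fold-based split equals the reference form (accumulator generalisation).
theorem pvSplit_agree_aux (sep nul : Int) (x : List Int) : ∀ (p : List (List Int)) (cur : List Int),
    (let st := x.foldl (fun (acc : List (List Int) × List Int) t =>
        if t = sep then (acc.1 ++ [acc.2], [])
        else if t ≠ nul then (acc.1, acc.2 ++ [t])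
        else acc) (p, cur)
     if st.2.length ≠ 0 then st.1 ++ [st.2] else st.1)
    = p ++ splitSpec sep nul x cur := by
  induction x with
  | nil =>
    intro p cur
    cases cur <;> simp [splitSpec]
  | cons t rest ih =>
    intro p cur
    have hB : splitSpec sep nul (t :: rest) cur =
        if t = sep then cur :: splitSpec sep nul rest []
        else if t = nul then splitSpec sep nul rest cur
        else splitSpec sep nul rest (cur ++ [t]) := rfl
    rw [hB]
    simp only [List.foldl_cons]
    by_cases h1 : t = sep
    · rw [if_pos h1, if_pos h1, ih (p ++ [cur]) []]
      simp
    · by_cases h2 : t = nul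
      · rw [if_neg h1, if_neg h1, if_neg (by simp [h2] : ¬ t ≠ nul), if_pos h2]
        exact ih p cur
      · rw [if_neg h1, if_neg h1, if_pos (h2 : t ≠ nul), if_neg h2]
        exact ih p (cur ++ [t])

theorem pvSplitA_eq_spec (sep nul : Int) (x : List Int) :
    pvSplitA sep nul x = splitSpec sep nul x [] := by
  have := pvSplit_agree_aux sep nul x [] []
  simpa [pvSplitA] using this

-- the reference split, characterised through the first separator position
theorem splitSpec_index (sep nul : Int) : ∀ (x : List Int) (cur : List Int),
    splitSpec sep nul x cur =
      match PySem.List.index? x sep with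
      | some k => (cur ++ (x.take k).filter (fun t => t ≠ nul)) :: splitSpec sep nul (x.drop (k + 1)) []
      | none =>
        let t := cur ++ x.filter (fun t => t ≠ nul)
        if t.isEmpty then [] else [t] := by
  intro x
  induction x with
  | nil =>
    intro cur
    simp [splitSpec, PySem.List.index?_eq_idxOf?]
  | cons t rest ih =>
    intro cur
    by_cases h1 : t = sep
    · subst h1
      rw [PySem.List.index?_cons_self]
      simp [splitSpec]
    · rw [PySem.List.index?_cons_of_ne _ h1]
      by_cases h2 : t = nul
      · have hL : splitSpec sep nul (t :: rest) cur = splitSpec sep nul rest cur := by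
          show (if t = sep then cur :: splitSpec sep nul rest []
                else if t = nul then splitSpec sep nul rest cur
                else splitSpec sep nul rest (cur ++ [t])) = _
          rw [if_neg h1, if_pos h2]
        rw [hL, ih cur]
        cases hi : PySem.List.index? rest sep with
        | some k => simp [Option.map_some, List.take_succ_cons, h2]
        | none => simp [Option.map_none, h2]
      · have hL : splitSpec sep nul (t :: rest) cur = splitSpec sep nul rest (cur ++ [t]) := by
          show (if t = sep then cur :: splitSpec sep nul rest []
                else if t = nul then splitSpec sep nul rest cur
                else splitSpec sep nul rest (cur ++ [t])) = _
          rw [if_neg h1, if_neg h2]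
        rw [hL, ih (cur ++ [t])]
        cases hi : PySem.List.index? rest sep with
        | some k => simp [Option.map_some, List.take_succ_cons, h2]
        | none => simp [Option.map_none, h2]

-- B's index-and-slice recursion computes the reference split.
theorem pvSplitB_eq_aux (sep nul : Int) : ∀ (n : Nat) (x : List Int), x.length ≤ n →
    pvSplitB sep nul x = splitSpec sep nul x [] := by
  intro n
  induction n with
  | zero =>
    intro x hx
    have : x = [] := List.length_eq_zero_iff.mp (Nat.le_zero.mp hx)
    subst this
    rw [pvSplitB]
    simp [splitSpec, PySem.List.index?_eq_idxOf?]
  | succ n ih =>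
    intro x hx
    rw [pvSplitB, splitSpec_index sep nul x []]
    cases h : PySem.List.index? x sep with
    | none => simp
    | some k =>
      obtain ⟨hk, -⟩ := PySem.List.getElem_of_index?_eq_some h
      have : (x.drop (k + 1)).length ≤ n := by
        simp [List.length_drop]; omega
      simp [ih _ this]

theorem pvSplitB_eq_spec (sep nul : Int) (x : List Int) :
    pvSplitB sep nul x = splitSpec sep nul x [] :=
  pvSplitB_eq_aux sep nul x.length x le_rfl

-- folding "append one constant element" over any list appends that many copies
theorem foldl_append_const {α β : Type} (c : α) (l : List β) : ∀ (a : List α),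
    l.foldl (fun a _ => a ++ [c]) a = a ++ List.replicate l.length c := by
  induction l with
  | nil => intro a; simp
  | cons b l ih =>
    intro a
    simp only [List.foldl_cons, List.length_cons]
    rw [ih (a ++ [c])]
    simp [List.replicate_succ]

-- A's padding helper in closed form
theorem pvPaddingA_eq (agent : List (List Int)) (m1 m2 : Nat) (nul : Int) :
    pvPaddingA agent m1 m2 nul
    = (agent ++ List.replicate (m1 - agent.length) []).map
        (fun (x : List Int) => x ++ List.replicate (m2 - x.length) nul) := by
  unfold pvPaddingA
  have hlen : ∀ (n k : Nat), (PySem.List.pyRange 0 ((n : Int) - (k : Int)) 1).length = n - k := by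
    intro n k
    rw [PySem.List.length_pyRange_one]
    omega
  have hrow : ∀ (x : List Int),
      (PySem.List.pyRange 0 ((m2 : Int) - (x.length : Int)) 1).foldl
        (fun a _ => a ++ [nul]) x = x ++ List.replicate (m2 - x.length) nul := by
    intro x
    rw [foldl_append_const, hlen]
  have hext : (PySem.List.pyRange 0 ((m1 : Int) - (agent.length : Int)) 1).foldl
      (fun a _ => a ++ [([] : List Int)]) agent
      = agent ++ List.replicate (m1 - agent.length) [] := by
    rw [foldl_append_const, hlen]
  rw [hext]
  simp only [hrow]

-- B's grid overlay in closed form (needs only that the agent fits into the grid height)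
theorem pvOverlay_eq (nul : Int) : ∀ (agent : List (List Int)) (mT mW : Nat),
    agent.length ≤ mT →
    pvOverlay (List.replicate mT (List.replicate mW nul)) agent
    = (agent ++ List.replicate (mT - agent.length) []).map
        (fun (x : List Int) => x ++ List.replicate (mW - x.length) nul) := by
  intro agent
  induction agent with
  | nil =>
    intro mT mW _
    simp [pvOverlay, List.map_replicate]
  | cons d a ih =>
    intro mT mW h
    cases mT with
    | zero => simp at h
    | succ m =>
      rw [List.replicate_succ]
      show (d ++ (List.replicate mW nul).drop d.length) :: pvOverlay (List.replicate m (List.replicate mW nul)) a = _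
      rw [ih m mW (by simpa using Nat.lt_succ_iff.mp (Nat.lt_of_lt_of_le (Nat.lt_succ_self _) (by simpa using h)))]
      simp [List.drop_replicate, Nat.succ_sub_succ]

-- A's nested max-words fold rewritten with `max`
theorem maxWordsA_eq (xss : List (List (List Int))) : ∀ (w : Nat),
    xss.foldl (fun m agent =>
      agent.foldl (fun m d => if d.length > m then d.length else m) m) w
    = xss.foldl (fun w agent => agent.foldl (fun m d => max m d.length) w) w := by
  induction xss with
  | nil => intro w; rfl
  | cons agent rest ih =>
    intro w
    simp only [List.foldl_cons]
    rw [ih]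
    congr 1
    induction agent generalizing w with
    | nil => rfl
    | cons d ds ihd =>
      simp only [List.foldl_cons]
      rw [ihd]
      congr 1
      simp only [gt_iff_lt, Nat.max_def]
      split_ifs <;> omega

-- nested max fold = max fold over the flattened length list
theorem foldl_max_flat (xss : List (List (List Int))) : ∀ (w : Nat),
    xss.foldl (fun w agent => agent.foldl (fun m d => max m d.length) w) w
    = (xss.flatMap (fun a => a.map (·.length))).foldl max w := by
  induction xss with
  | nil => intro w; rfl
  | cons agent rest ih =>
    intro w
    simp only [List.foldl_cons, List.flatMap_cons, List.foldl_append]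
    rw [ih]
    congr 1
    rw [List.foldl_map]

-- Python max(l) / max(l, default=0) over Nats is the running-max fold from 0
theorem pyMax_id_getD (l : List Nat) :
    (PySem.List.max? l (fun n => n)).getD 0 = l.foldl max 0 := by
  cases l with
  | nil => rw [(PySem.List.max?_eq_none_iff ([] : List Nat) (fun n => n)).mpr rfl]; rfl
  | cons x t =>
    rw [PySem.List.max?_id_cons]
    simp [List.foldl_cons]

theorem pyMax?_id_eq (l : List Nat) :
    PySem.List.max? l (fun n => n) = l.max? := by
  cases l with
  | nil => rw [(PySem.List.max?_eq_none_iff ([] : List Nat) (fun n => n)).mpr rfl]; rfl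
  | cons x t => rw [PySem.List.max?_id_cons, List.max?_cons']

-- the post-split pipelines of the two ports agree, for any list of split agents
theorem main_eq (nul : Int) (S : List (List (List Int))) :
    (match (S.map (·.length)).max? with
     | none => ([] : List (List (List Int)))
     | some maxTurn => S.map (fun agent => pvPaddingA agent maxTurn (pvMaxWordsA S) nul))
    = (match PySem.List.max? (S.map (·.length)) (fun n => n) with
       | none => ([] : List (List (List Int)))
       | some maxTurn =>
         S.map (fun agent =>
           pvOverlay ((List.range maxTurn).map (fun _ =>
             List.replicate ((PySem.List.max? (S.flatMap (fun a => a.map (·.length))) (fun n => n)).getD 0) nul)) agent)) := by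
  rw [pyMax?_id_eq]
  cases hmax : (S.map (·.length)).max? with
  | none => rfl
  | some maxTurn =>
    simp only
    have hW : ((PySem.List.max? (S.flatMap (fun a => a.map (·.length))) (fun n => n)).getD 0)
        = pvMaxWordsA S := by
      rw [pyMax_id_getD, pvMaxWordsA, maxWordsA_eq, foldl_max_flat]
    rw [hW]
    apply List.map_congr_left
    intro agent hmem
    have hbound : agent.length ≤ maxTurn := by
      have h1 : PySem.List.max? (S.map (·.length)) (fun n => n) = some maxTurn := by
        rw [pyMax?_id_eq]; exact hmax
      have := PySem.List.max?_isMax h1 agent.length (List.mem_map_of_mem hmem)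
      simpa using this
    rw [pvPaddingA_eq]
    have hgrid : (List.range maxTurn).map (fun _ => List.replicate (pvMaxWordsA S) nul)
        = List.replicate maxTurn (List.replicate (pvMaxWordsA S) nul) := by
      simp [List.map_const']
    rw [hgrid, pvOverlay_eq nul agent maxTurn (pvMaxWordsA S) hbound]

-- ===== VERDICT (by name: the statement is the Claim_ definition above) =====
theorem split_pad_vector_spec : Claim_equal_split_pad_vector := by
  intro xs sep nul _ _
  unfold Spec_split_pad_vector split_pad_vector split_pad_vector_alt
  have hsplit : xs.map (pvSplitB sep nul) = xs.map (pvSplitA sep nul) := by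
    apply List.map_congr_left
    intro x _
    rw [pvSplitB_eq_spec, pvSplitA_eq_spec]
  rw [hsplit]
  exact main_eq nul (xs.map (pvSplitA sep nul))
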